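-- pv_equiv track=rewrite | github.com/EdizCinbas/ComplexCodes | CaesarDecryptWithoutKey/caesarCypherDecoder.py | dictionary_lookup
-- ===== SOURCE A (Python) =====
-- def dictionary_lookup(decrypted_texts, english_words):
--
--     valid_decryption = None
--     max_word_count = 0
--
--     # Looping through both the possible decryptions and every word in the dictionary (3000 words)
--     for decrypt in decrypted_texts:
--         currentIndex = 0
--         count = 0
--         while currentIndex < len(decrypt):
--             match_found = False
--             for word in english_words:
--                 if decrypt.startswith(word, currentIndex):
--                     # If the possible decryption has a word in it
--                     # move the search the next set of letters and add to count
--                     currentIndex += len(word)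
--                     count += 1
--                     match_found = True
--                     break
--             if not match_found:
--                 break
--
--         # The decrypt possiblity with the most number of valid words gets saved
--         if count > max_word_count:
--             max_word_count = count
--             valid_decryption = decrypt
--
--     return valid_decryption
-- ===== SOURCE B (Python) =====
-- def dictionary_lookup(decrypted_texts, english_words):
--     # Hash-index approach: build word -> earliest list index once, then at each
--     # position try candidate lengths 1..maxlen and keep the match with the
--     # smallest list index (= the word A's inner scan would hit first).
--     index_of = {}
--     for i, w in enumerate(english_words):
--         if w not in index_of:
--             index_of[w] = i
--     maxlen = 0
--     for w in english_words:
--         if len(w) > maxlen: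
--             maxlen = len(w)
--     best = None
--     best_count = 0
--     for text in decrypted_texts:
--         n = len(text)
--         i = 0
--         count = 0
--         while i < n:
--             cand = None  # (index in english_words, length)
--             for L in range(1, min(maxlen, n - i) + 1):
--                 j = index_of.get(text[i:i + L])
--                 if j is not None and (cand is None or j < cand[0]):
--                     cand = (j, L)
--             if cand is None:
--                 break
--             i += cand[1]
--             count += 1
--         if count > best_count:
--             best_count = count
--             best = text
--     return best
-- ===== Notes on version B (the rewrite author's own statement) =====
-- stated objective: faster
-- what changed: Instead of scanning the whole dictionary at every text position, B builds a word-to-earliest-index hash map once and, at each position, tries only the candidate substring lengths 1..maxlen, picking the match with the smallest list index (exactly the word A's inner scan hits first).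
-- outside the precondition, e.g. on dictionary_lookup(['ab'], ['ab', '']): A returns 'ab', B returns 'ab'; on dictionary_lookup(['a'], ['']): A does not finish within the time limit, B returns None
import Mathlib
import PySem

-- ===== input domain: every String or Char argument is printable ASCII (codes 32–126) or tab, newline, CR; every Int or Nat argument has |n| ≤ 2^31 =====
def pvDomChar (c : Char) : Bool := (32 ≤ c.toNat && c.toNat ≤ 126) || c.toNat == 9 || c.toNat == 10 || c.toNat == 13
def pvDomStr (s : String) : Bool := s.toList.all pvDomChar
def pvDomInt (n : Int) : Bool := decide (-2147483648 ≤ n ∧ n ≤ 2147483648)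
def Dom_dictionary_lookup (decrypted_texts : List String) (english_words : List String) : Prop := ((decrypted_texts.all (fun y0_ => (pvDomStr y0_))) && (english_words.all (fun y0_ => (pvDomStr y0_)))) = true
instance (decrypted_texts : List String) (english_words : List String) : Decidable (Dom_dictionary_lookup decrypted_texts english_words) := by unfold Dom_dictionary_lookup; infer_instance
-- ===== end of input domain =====

-- B replaces A's inner scan over all dictionary words at every position by a word→first-index
-- hash built once plus a scan over candidate lengths (objective: faster).

-- ===== PORT A =====
-- s.startswith(w, i) for 0 ≤ i: exact — Python returns False when i > len(s) (even for w = ""),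
-- else compares w against s[i:i+len(w)].
def pyStartswithFrom (s w : List Char) (i : Nat) : Bool :=
  decide (i ≤ s.length) && PySem.Chars.startswith (s.drop i) w

-- A's inner `for word in english_words: … break` = first word matching at i
def aFind (words : List String) (s : List Char) (i : Nat) : Option String :=
  words.find? (fun w => pyStartswithFrom s w.toList i)

-- A's `while currentIndex < len(decrypt)` loop; fuel s.length + 1 suffices because under
-- Pre_ every matched word is nonempty, so the index strictly increases (Python A diverges
-- when "" ∈ english_words; those inputs are outside Pre_).
def aLoop (words : List String) (s : List Char) : Nat → Nat → Nat → Nat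
  | 0, _, count => count
  | fuel + 1, i, count =>
    if i < s.length then
      match aFind words s i with
      | some w => aLoop words s fuel (i + w.toList.length) (count + 1)
      | none => count
    else count

def dictionary_lookup (decrypted_texts : List String) (english_words : List String) : Option String :=
  (decrypted_texts.foldl
    (fun acc decrypt =>
      let count := aLoop english_words decrypt.toList (decrypt.toList.length + 1) 0 0
      if acc.2 < count then (some decrypt, count) else acc)
    ((none : Option String), (0 : Nat))).1

-- ===== PORT B =====
-- index_of: word → earliest list index (insert only when absent)
def bIndex (words : List String) : PySem.Dict String Int :=
  (PySem.List.enumerate words 0).foldl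
    (fun d p => if d.contains p.2 then d else d.insert p.2 p.1) PySem.Dict.empty

def bMaxlen (words : List String) : Nat :=
  words.foldl (fun m w => if m < w.toList.length then w.toList.length else m) 0

-- text[i:i+L] ported as (s.drop i).take L (= PySem.List.slice_natCast_add)
def bKey (s : List Char) (i L : Nat) : String := String.ofList ((s.drop i).take L)

-- body of Source B's `for L in range(1, …)` loop
def bStep (d : PySem.Dict String Int) (s : List Char) (i : Nat)
    (cand : Option (Int × Nat)) (L : Nat) : Option (Int × Nat) :=
  match d.get? (bKey s i L) with
  | some j =>
    match cand with
    | none => some (j, L)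
    | some c => if j < c.1 then some (j, L) else some c
  | none => cand

-- range(1, min(maxlen, n-i) + 1) = List.range' 1 (min maxlen (n - i))
def bCand (d : PySem.Dict String Int) (s : List Char) (i maxlen : Nat) : Option (Int × Nat) :=
  (List.range' 1 (min maxlen (s.length - i))).foldl (bStep d s i) none

-- Source B's `while i < n` loop, same fuel discipline as the A port
def bLoop (d : PySem.Dict String Int) (maxlen : Nat) (s : List Char) : Nat → Nat → Nat → Nat
  | 0, _, count => count
  | fuel + 1, i, count =>
    if i < s.length then
      match bCand d s i maxlen with
      | some c => bLoop d maxlen s fuel (i + c.2) (count + 1)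
      | none => count
    else count

def dictionary_lookup_alt (decrypted_texts : List String) (english_words : List String) : Option String :=
  let d := bIndex english_words
  let maxlen := bMaxlen english_words
  (decrypted_texts.foldl
    (fun acc text =>
      let count := bLoop d maxlen text.toList (text.toList.length + 1) 0 0
      if acc.2 < count then (some text, count) else acc)
    ((none : Option String), (0 : Nat))).1

-- ===== PRECONDITION & SPEC =====
-- Pre_ excludes word lists containing the empty string: there A's greedy scan can loop forever
-- (the empty word matches without advancing the index); where A still happens to return, B agrees anyway.
def Pre_dictionary_lookup (decrypted_texts : List String) (english_words : List String) : Prop :=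
  "" ∉ english_words
instance (decrypted_texts : List String) (english_words : List String) : Decidable (Pre_dictionary_lookup decrypted_texts english_words) := by unfold Pre_dictionary_lookup; infer_instance
def pvWitness_dictionary_lookup : List String × List String := (["abab", "zz"], ["ab", "z"])

def Spec_dictionary_lookup (decrypted_texts : List String) (english_words : List String) (out : Option String) : Prop := out = dictionary_lookup_alt decrypted_texts english_words
instance (decrypted_texts : List String) (english_words : List String) (out : Option String) : Decidable (Spec_dictionary_lookup decrypted_texts english_words out) := by unfold Spec_dictionary_lookup; infer_instance

-- ===== CLAIM (what is proved, stated in full; the proofs are below) =====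
def Claim_equal_dictionary_lookup : Prop := ∀ (decrypted_texts : List String) (english_words : List String), Dom_dictionary_lookup decrypted_texts english_words → Pre_dictionary_lookup decrypted_texts english_words → Spec_dictionary_lookup decrypted_texts english_words (dictionary_lookup decrypted_texts english_words)

-- ===== LEMMAS AND PROOFS =====

lemma bMaxlen_aux (l : List String) (acc : Nat) :
    acc ≤ l.foldl (fun m w => if m < w.toList.length then w.toList.length else m) acc ∧
    ∀ w ∈ l, w.toList.length ≤ l.foldl (fun m w => if m < w.toList.length then w.toList.length else m) acc := by
  induction l generalizing acc with
  | nil => simp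
  | cons x l ih =>
    simp only [List.foldl_cons, List.mem_cons]
    obtain ⟨h1, h2⟩ := ih (if acc < x.toList.length then x.toList.length else acc)
    refine ⟨le_trans (by split <;> omega) h1, ?_⟩
    rintro w (rfl | hw)
    · exact le_trans (by split <;> omega) h1
    · exact h2 w hw

lemma le_bMaxlen {w : String} {words : List String} (h : w ∈ words) :
    w.toList.length ≤ bMaxlen words :=
  (bMaxlen_aux words 0).2 w h

lemma bIndex_aux (ws : List String) (k : Int) (d : PySem.Dict String Int) (w : String) :
    ((PySem.List.enumerate ws k).foldl
      (fun d p => if d.contains p.2 then d else d.insert p.2 p.1) d).get? w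
    = (d.get? w).or ((List.idxOf? w ws).map (fun t : Nat => k + (t : Int))) := by
  induction ws generalizing k d with
  | nil => simp [PySem.List.enumerate_nil]
  | cons x ws ih =>
    rw [PySem.List.enumerate_cons, List.foldl_cons, ih]
    by_cases hw : x = w
    · subst hw
      simp only [List.idxOf?_cons, beq_self_eq_true, if_true]
      have h2 := PySem.Dict.contains_eq_isSome_get? (d := d) (k := x)
      by_cases hc : d.contains x = true
      · obtain ⟨v, hv⟩ := Option.isSome_iff_exists.mp (by rw [← h2]; exact hc)
        simp [hc, hv]
      · have hnone : d.get? x = none := by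
          cases hg : d.get? x with
          | none => rfl
          | some v => exact absurd (by rw [h2, hg]; rfl) hc
        simp [hc, hnone, PySem.Dict.get?_insert_self]
    · have hkey : (if d.contains x then d else d.insert x k).get? w = d.get? w := by
        split
        · rfl
        · exact PySem.Dict.get?_insert_of_ne d k (fun h => hw h.symm)
      rw [hkey]
      have hidx : List.idxOf? w (x :: ws) = (List.idxOf? w ws).map (· + 1) := by
        simp [List.idxOf?_cons, hw]
      rw [hidx]
      cases hI : List.idxOf? w ws with
      | none => simp
      | some t =>
        have h3 : k + 1 + (t : Int) = k + ((t : Int) + 1) := by ring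
        simp [h3]

lemma bIndex_get? (words : List String) (w : String) :
    (bIndex words).get? w = (List.idxOf? w words).map (fun t : Nat => (t : Int)) := by
  rw [bIndex, bIndex_aux]
  simp [PySem.Dict.get?_empty]

lemma idxOf?_eq_some_iff' {w : String} {l : List String} {t : Nat} :
    List.idxOf? w l = some t ↔ ∃ h : t < l.length, l[t] = w ∧ ∀ j (_ : j < t), l[j] ≠ w := by
  rw [show List.idxOf? w l = List.findIdx? (fun x => x == w) l from rfl,
    List.findIdx?_eq_some_iff_getElem]
  simp

-- startswith characterisation
lemma pyStartswithFrom_iff {s w : List Char} {i : Nat} :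
    pyStartswithFrom s w i = true ↔ i ≤ s.length ∧ w <+: s.drop i := by
  simp [pyStartswithFrom, PySem.Chars.startswith_iff]

-- foldl over bStep keeps an accumulator that is already minimal
lemma foldl_bStep_keep (d : PySem.Dict String Int) (s : List Char) (i : Nat)
    (Ls : List Nat) (j0 : Int) (L0 : Nat)
    (h : ∀ L ∈ Ls, ∀ j, d.get? (bKey s i L) = some j → j0 ≤ j) :
    Ls.foldl (bStep d s i) (some (j0, L0)) = some (j0, L0) := by
  induction Ls with
  | nil => rfl
  | cons L Ls ih =>
    have hstep : bStep d s i (some (j0, L0)) L = some (j0, L0) := by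
      unfold bStep
      cases hL : d.get? (bKey s i L) with
      | none => rfl
      | some j =>
        have := h L (by simp) j hL
        simp only [not_lt.mpr this, if_false]
    simp only [List.foldl_cons, hstep]
    exact ih (fun L hL j hj => h L (by simp [hL]) j hj)

-- a foldl over bStep either returns its accumulator or a looked-up pair
lemma foldl_bStep_cases (d : PySem.Dict String Int) (s : List Char) (i : Nat)
    (Ls : List Nat) (acc : Option (Int × Nat)) :
    Ls.foldl (bStep d s i) acc = acc ∨
    ∃ j L, L ∈ Ls ∧ d.get? (bKey s i L) = some j ∧ Ls.foldl (bStep d s i) acc = some (j, L) := by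
  induction Ls generalizing acc with
  | nil => left; rfl
  | cons L Ls ih =>
    simp only [List.foldl_cons]
    have hstep : bStep d s i acc L = acc ∨
        ∃ j, d.get? (bKey s i L) = some j ∧ bStep d s i acc L = some (j, L) := by
      unfold bStep
      cases hL : d.get? (bKey s i L) with
      | none => left; rfl
      | some j =>
        cases acc with
        | none => right; exact ⟨j, rfl, rfl⟩
        | some c =>
          by_cases hlt : j < c.1
          · right; exact ⟨j, rfl, by simp [hlt]⟩
          · left; simp [hlt]
    rcases ih (bStep d s i acc L) with h1 | ⟨j', L', hmem, hget, hres⟩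
    · rw [h1]
      rcases hstep with h2 | ⟨j, hget, h2⟩
      · left; exact h2
      · right; exact ⟨j, L, by simp, hget, h2⟩
    · right; exact ⟨j', L', by simp [hmem], hget, hres⟩

lemma foldl_bStep_none (d : PySem.Dict String Int) (s : List Char) (i : Nat)
    (Ls : List Nat) (h : ∀ L ∈ Ls, d.get? (bKey s i L) = none) :
    Ls.foldl (bStep d s i) none = none := by
  induction Ls with
  | nil => rfl
  | cons L Ls ih =>
    have hstep : bStep d s i none L = none := by
      unfold bStep; rw [h L (by simp)]
    simp only [List.foldl_cons, hstep]
    exact ih (fun L hL => h L (by simp [hL]))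

-- the crux: at every in-range position A's first matching word and B's best candidate advance equally
lemma step_eq (words : List String) (s : List Char) (hPre : "" ∉ words)
    (i : Nat) (hi : i < s.length) :
    (aFind words s i).map (fun w => w.toList.length)
    = (bCand (bIndex words) s i (bMaxlen words)).map (·.2) := by
  have hkeylen : ∀ L, L ≤ s.length - i → (bKey s i L).toList.length = L := by
    intro L hL
    rw [bKey, String.toList_ofList, List.length_take, List.length_drop]
    omega
  -- every successful lookup of bKey s i L (L in range) comes from a word matching at i
  have hlook : ∀ L, 1 ≤ L → L ≤ s.length - i → ∀ j, (bIndex words).get? (bKey s i L) = some j →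
      ∃ t : Nat, j = (t : Int) ∧ ∃ ht : t < words.length, words[t] = bKey s i L ∧
        (∀ u (_ : u < t), words[u] ≠ bKey s i L) ∧
        pyStartswithFrom s (bKey s i L).toList i = true := by
    intro L hL1 hL2 j hj
    rw [bIndex_get?] at hj
    obtain ⟨t, hidx, rfl⟩ := Option.map_eq_some_iff.mp hj
    obtain ⟨ht, heq, hfirst⟩ := idxOf?_eq_some_iff'.mp hidx
    refine ⟨t, rfl, ht, heq, hfirst, ?_⟩
    rw [pyStartswithFrom_iff, bKey, String.toList_ofList]
    exact ⟨le_of_lt hi, List.take_prefix L (s.drop i)⟩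
  cases hF : words.findIdx? (fun w => pyStartswithFrom s w.toList i) with
  | none =>
    have hnone := List.findIdx?_eq_none_iff.mp hF
    have ha : aFind words s i = none :=
      List.find?_eq_none.mpr (fun w hw => by simp [hnone w hw])
    have hb : bCand (bIndex words) s i (bMaxlen words) = none := by
      apply foldl_bStep_none
      intro L hLmem
      rw [List.mem_range'_1] at hLmem
      cases hg : (bIndex words).get? (bKey s i L) with
      | none => rfl
      | some j =>
        exfalso
        obtain ⟨t, -, ht, heq, -, hpk⟩ := hlook L hLmem.1 (by omega) j hg
        have := hnone words[t] (List.getElem_mem ht)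
        rw [heq, hpk] at this
        exact Bool.true_eq_false.mp this
    rw [ha, hb]; rfl
  | some m =>
    obtain ⟨hm, hpm, hmin⟩ := List.findIdx?_eq_some_iff_getElem.mp hF
    obtain ⟨hile, hpre⟩ := pyStartswithFrom_iff.mp hpm
    have hw_mem : words[m] ∈ words := List.getElem_mem hm
    have hL1 : 1 ≤ words[m].toList.length := by
      rcases Nat.eq_zero_or_pos words[m].toList.length with h0 | h
      · exfalso
        apply hPre
        have : words[m].toList = [] := List.eq_nil_of_length_eq_zero h0
        have he : words[m] = "" := by
          have := congrArg String.ofList this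
          rwa [String.ofList_toList] at this
        rwa [← he]
      · exact h
    have hL2 : words[m].toList.length ≤ s.length - i := by
      have := hpre.length_le
      rwa [List.length_drop] at this
    have htake : (s.drop i).take words[m].toList.length = words[m].toList :=
      (List.prefix_iff_eq_take.mp hpre).symm
    have hkeym : bKey s i words[m].toList.length = words[m] := by
      rw [bKey, htake, String.ofList_toList]
    have hmem : words[m].toList.length ∈ List.range' 1 (min (bMaxlen words) (s.length - i)) := by
      rw [List.mem_range'_1]
      have := le_bMaxlen hw_mem
      omega
    have hidxm : List.idxOf? words[m] words = some m := by
      rw [idxOf?_eq_some_iff']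
      refine ⟨hm, rfl, fun j hj hEq => ?_⟩
      have := hmin j hj
      rw [hEq, hpm] at this
      exact this rfl
    have hgetm : (bIndex words).get? (bKey s i words[m].toList.length) = some (m : Int) := by
      rw [hkeym, bIndex_get?, hidxm]; rfl
    have hminprop : ∀ L ∈ List.range' 1 (min (bMaxlen words) (s.length - i)), ∀ j,
        (bIndex words).get? (bKey s i L) = some j →
        (m : Int) ≤ j ∧ (j = (m : Int) → L = words[m].toList.length) := by
      intro L hLmem j hj
      rw [List.mem_range'_1] at hLmem
      obtain ⟨t, rfl, ht, heq, -, hpk⟩ := hlook L hLmem.1 (by omega) j hj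
      have hmt : m ≤ t := by
        by_contra hlt
        have := hmin t (by omega)
        rw [heq, hpk] at this
        exact this rfl
      refine ⟨by exact_mod_cast hmt, fun hjm => ?_⟩
      have htm : t = m := by exact_mod_cast hjm
      subst htm
      have : words[t] = bKey s i L := heq
      calc L = (bKey s i L).toList.length := (hkeylen L (by omega)).symm
        _ = words[t].toList.length := by rw [this]
    have ha : aFind words s i = some words[m] := by
      rw [aFind, List.find?_eq_bind_findIdx?_getElem?, hF]
      simp [List.getElem?_eq_getElem hm]
    have hb : bCand (bIndex words) s i (bMaxlen words) = some ((m : Int), words[m].toList.length) := by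
      obtain ⟨Ls1, Ls2, hsplit⟩ := List.append_of_mem hmem
      have hsub1 : ∀ L ∈ Ls1, L ∈ List.range' 1 (min (bMaxlen words) (s.length - i)) := by
        intro L hL; rw [hsplit]; simp [hL]
      have hsub2 : ∀ L ∈ Ls2, L ∈ List.range' 1 (min (bMaxlen words) (s.length - i)) := by
        intro L hL; rw [hsplit]; simp [hL]
      rw [bCand, hsplit, List.foldl_append, List.foldl_cons]
      have hstep : bStep (bIndex words) s i
          (List.foldl (bStep (bIndex words) s i) none Ls1) words[m].toList.length
          = some ((m : Int), words[m].toList.length) := by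
        rcases foldl_bStep_cases (bIndex words) s i Ls1 none with hacc | ⟨j, L, hLmem1, hget, hacc⟩
        · rw [hacc]
          unfold bStep
          rw [hgetm]
        · rw [hacc]
          obtain ⟨hle, huniq⟩ := hminprop L (hsub1 L hLmem1) j hget
          unfold bStep
          rw [hgetm]
          by_cases hlt : (m : Int) < j
          · simp [hlt]
          · have hjm : j = (m : Int) := le_antisymm (not_lt.mp hlt) hle
            simp [hjm, huniq hjm]
      rw [hstep]
      exact foldl_bStep_keep _ _ _ _ _ _
        (fun L hL j hj => (hminprop L (hsub2 L hL) j hj).1)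
    rw [ha, hb]
    rfl

lemma loops_eq (words : List String) (s : List Char) (hPre : "" ∉ words) :
    ∀ fuel i count, aLoop words s fuel i count = bLoop (bIndex words) (bMaxlen words) s fuel i count := by
  intro fuel
  induction fuel with
  | zero => intro i count; rfl
  | succ fuel ih =>
    intro i count
    simp only [aLoop, bLoop]
    by_cases hi : i < s.length
    · simp only [hi, if_true]
      have h := step_eq words s hPre i hi
      cases ha : aFind words s i with
      | none =>
        rw [ha] at h
        cases hb : bCand (bIndex words) s i (bMaxlen words) with
        | none => rfl
        | some c => rw [hb] at h; simp at h
      | some w =>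
        rw [ha] at h
        cases hb : bCand (bIndex words) s i (bMaxlen words) with
        | none => rw [hb] at h; simp at h
        | some c =>
          rw [hb] at h
          simp only [Option.map_some, Option.some.injEq] at h
          simp only [h]
          exact ih _ _
    · simp only [hi, if_false]

-- ===== VERDICT (by name: the statement is the Claim_ definition above) =====
theorem dictionary_lookup_spec : Claim_equal_dictionary_lookup := by
  intro texts words _hDom hPre
  unfold Spec_dictionary_lookup dictionary_lookup dictionary_lookup_alt
  have hstep : (fun (acc : Option String × Nat) decrypt =>
      let count := aLoop words decrypt.toList (decrypt.toList.length + 1) 0 0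
      if acc.2 < count then (some decrypt, count) else acc)
      = (fun (acc : Option String × Nat) text =>
      let count := bLoop (bIndex words) (bMaxlen words) text.toList (text.toList.length + 1) 0 0
      if acc.2 < count then (some text, count) else acc) := by
    funext acc t
    rw [loops_eq words t.toList hPre]
  simp only [hstep]
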